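-- pv_equiv track=rewrite | github.com/Hamzar2/Twitter-Sentiment-Analysis | run.py | count_sentiments_by_entity
-- ===== SOURCE A (Python) =====
-- def count_sentiments_by_entity(data):
--     sentiments_by_entity = {}
--     for row in data:
--         entity = row['Entity']
--         sentiment = row['Sentiment']
--         if entity not in sentiments_by_entity:
--             sentiments_by_entity[entity] = {}
--         if sentiment not in sentiments_by_entity[entity]:
--             sentiments_by_entity[entity][sentiment] = 0
--         sentiments_by_entity[entity][sentiment] += 1
--     return sentiments_by_entity
-- ===== SOURCE B (Python) =====
-- def count_sentiments_by_entity(data):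
--     flat = {}
--     for row in data:
--         key = (row['Entity'], row['Sentiment'])
--         flat[key] = flat.get(key, 0) + 1
--     result = {}
--     for (entity, sentiment), count in flat.items():
--         result.setdefault(entity, {})[sentiment] = count
--     return result
-- ===== Notes on version B (the rewrite author's own statement) =====
-- stated objective: alternative
-- what changed: Replaces the single nested-dict pass (membership tests and in-place nested updates per row) by two flat passes: first a flat tally keyed by the (entity, sentiment) pair, then a pivot of that flat table into the nested dict via setdefault.
import Mathlib
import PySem

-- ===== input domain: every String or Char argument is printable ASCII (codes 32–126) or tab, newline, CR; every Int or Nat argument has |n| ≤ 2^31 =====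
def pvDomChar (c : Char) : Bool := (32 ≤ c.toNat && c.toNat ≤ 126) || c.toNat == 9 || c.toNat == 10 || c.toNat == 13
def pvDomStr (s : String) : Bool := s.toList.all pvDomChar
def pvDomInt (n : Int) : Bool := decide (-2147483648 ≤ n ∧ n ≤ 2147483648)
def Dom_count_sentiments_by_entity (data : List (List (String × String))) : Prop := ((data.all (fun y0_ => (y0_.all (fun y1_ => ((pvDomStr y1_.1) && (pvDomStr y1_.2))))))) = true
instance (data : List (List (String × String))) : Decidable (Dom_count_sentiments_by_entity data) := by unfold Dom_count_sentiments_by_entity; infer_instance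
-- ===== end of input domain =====

-- B replaces A's single nested-dict pass by a flat (entity, sentiment) tally followed by a pivot pass; same results, similar cost.


-- ===== PORT A =====
-- row['Entity'] / row['Sentiment']: first-match lookup in the row dict; the .getD "" default
-- is never reached on Pre_ (Python raises KeyError exactly when the key is missing).
def aStep (acc : PySem.Dict String (PySem.Dict String Int)) (row : List (String × String)) :
    PySem.Dict String (PySem.Dict String Int) :=
  let entity := ((PySem.Dict.mk row).get? "Entity").getD ""
  let sentiment := ((PySem.Dict.mk row).get? "Sentiment").getD ""
  let acc := if acc.contains entity then acc else acc.insert entity PySem.Dict.empty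
  let inner := acc.getD entity PySem.Dict.empty
  let inner := if inner.contains sentiment then inner else inner.insert sentiment (0 : Int)
  let inner := inner.insert sentiment (inner.getD sentiment 0 + 1)
  acc.insert entity inner

def count_sentiments_by_entity (data : List (List (String × String))) : List (String × List (String × Int)) :=
  (data.foldl aStep PySem.Dict.empty).items.map (fun p => (p.1, p.2.items))

-- ===== PORT B =====
def bKey (row : List (String × String)) : String × String :=
  (((PySem.Dict.mk row).get? "Entity").getD "", ((PySem.Dict.mk row).get? "Sentiment").getD "")

def bTally (flat : PySem.Dict (String × String) Int) (row : List (String × String)) :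
    PySem.Dict (String × String) Int :=
  flat.insert (bKey row) (flat.getD (bKey row) 0 + 1)

-- result.setdefault(entity, {})[sentiment] = count
def bPivot (res : PySem.Dict String (PySem.Dict String Int)) (p : (String × String) × Int) :
    PySem.Dict String (PySem.Dict String Int) :=
  let res := res.setdefault p.1.1 PySem.Dict.empty
  res.insert p.1.1 ((res.getD p.1.1 PySem.Dict.empty).insert p.1.2 p.2)

def count_sentiments_by_entity_alt (data : List (List (String × String))) : List (String × List (String × Int)) :=
  ((data.foldl bTally PySem.Dict.empty).items.foldl bPivot PySem.Dict.empty).items.map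
    (fun p => (p.1, p.2.items))

-- ===== PRECONDITION & SPEC =====
-- Pre_ excludes exactly the rows missing an 'Entity' or 'Sentiment' key, on which Python A raises KeyError.
def Pre_count_sentiments_by_entity (data : List (List (String × String))) : Prop :=
  ∀ row ∈ data, (PySem.Dict.mk row).contains "Entity" = true ∧ (PySem.Dict.mk row).contains "Sentiment" = true
instance (data : List (List (String × String))) : Decidable (Pre_count_sentiments_by_entity data) := by
  unfold Pre_count_sentiments_by_entity; infer_instance

def pvWitness_count_sentiments_by_entity : (List (List (String × String))) :=
  [[("Entity", "apple"), ("Sentiment", "Positive")], [("Entity", "apple"), ("Sentiment", "Negative")]]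

def Spec_count_sentiments_by_entity (data : List (List (String × String))) (out : List (String × List (String × Int))) : Prop := out = count_sentiments_by_entity_alt data
instance (data : List (List (String × String))) (out : List (String × List (String × Int))) : Decidable (Spec_count_sentiments_by_entity data out) := by unfold Spec_count_sentiments_by_entity; infer_instance

-- ===== CLAIM (what is proved, stated in full; the proofs are below) =====
def Claim_equal_count_sentiments_by_entity : Prop := ∀ (data : List (List (String × String))), Dom_count_sentiments_by_entity data → Pre_count_sentiments_by_entity data → Spec_count_sentiments_by_entity data (count_sentiments_by_entity data)

-- ===== LEMMAS AND PROOFS =====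

-- the common one-key update both steps reduce to
def nstep (n : PySem.Dict String (PySem.Dict String Int)) (e s : String) (w : Int) :
    PySem.Dict String (PySem.Dict String Int) :=
  n.insert e ((n.getD e PySem.Dict.empty).insert s w)

theorem bPivot_eq (res : PySem.Dict String (PySem.Dict String Int)) (p : (String × String) × Int) :
    bPivot res p = nstep res p.1.1 p.1.2 p.2 := by
  unfold bPivot nstep
  by_cases h : res.contains p.1.1
  · rw [PySem.Dict.setdefault_of_contains _ _ h]
  · rw [PySem.Dict.setdefault_of_not_contains _ _ (by simpa using h)]
    simp [PySem.Dict.getD_insert_self, PySem.Dict.insert_insert_self,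
      PySem.Dict.getD_of_not_contains _ _ (by simpa using h)]

theorem aStep_eq (acc : PySem.Dict String (PySem.Dict String Int)) (row : List (String × String)) :
    aStep acc row = nstep acc (bKey row).1 (bKey row).2
      (((acc.getD (bKey row).1 PySem.Dict.empty).getD (bKey row).2 0) + 1) := by
  unfold aStep nstep bKey
  simp only []
  by_cases he : acc.contains (((PySem.Dict.mk row).get? "Entity").getD "")
  · simp only [he, if_true]
    by_cases hs : (acc.getD (((PySem.Dict.mk row).get? "Entity").getD "") PySem.Dict.empty).contains
        (((PySem.Dict.mk row).get? "Sentiment").getD "")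
    · simp [hs]
    · simp [hs, PySem.Dict.getD_insert_self, PySem.Dict.insert_insert_self,
        PySem.Dict.getD_of_not_contains _ _ (by simpa using hs)]
  · simp only [he]
    simp [PySem.Dict.getD_of_not_contains _ _ (by simpa using he),
      PySem.Dict.contains_empty, PySem.Dict.getD_insert_self, PySem.Dict.getD_empty,
      PySem.Dict.insert_insert_self]

theorem insert_comm_of_contains {κ ν : Type} [BEq κ] [LawfulBEq κ]
    (d : PySem.Dict κ ν) (k k' : κ) (v w : ν) (hk : d.contains k = true) (hne : k' ≠ k) :
    (d.insert k v).insert k' w = (d.insert k' w).insert k v := by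
  apply PySem.Dict.ext
  by_cases h' : d.contains k' = true
  · rw [PySem.Dict.items_insert_of_contains _ _ (by rw [PySem.Dict.contains_insert]; simp [h']),
        PySem.Dict.items_insert_of_contains _ _ hk,
        PySem.Dict.items_insert_of_contains _ _ (by rw [PySem.Dict.contains_insert]; simp [hk]),
        PySem.Dict.items_insert_of_contains _ _ h']
    simp only [List.map_map]
    apply List.map_congr_left
    intro p _
    by_cases h1 : p.1 = k <;> by_cases h2 : p.1 = k' <;>
      simp_all [Function.comp, Ne.symm hne]
  · have hf : d.contains k' = false := by simpa using h'
    rw [PySem.Dict.items_insert_of_not_contains _ _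
          (by rw [PySem.Dict.contains_insert]; simp [hf, hne]),
        PySem.Dict.items_insert_of_contains _ _ hk,
        PySem.Dict.items_insert_of_contains _ _
          (by rw [PySem.Dict.contains_insert]; simp [hk]),
        PySem.Dict.items_insert_of_not_contains _ _ hf,
        List.map_append]
    simp [hne]

theorem nstep_comm (D : PySem.Dict String (PySem.Dict String Int)) (e s e' s' : String) (w c : Int)
    (he : D.contains e = true) (hs : (D.getD e PySem.Dict.empty).contains s = true)
    (hne : (e', s') ≠ (e, s)) :
    nstep (nstep D e s w) e' s' c = nstep (nstep D e' s' c) e s w := by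
  unfold nstep
  by_cases hee : e' = e
  · subst hee
    have hss : s' ≠ s := by simpa using hne
    rw [PySem.Dict.getD_insert_self, PySem.Dict.getD_insert_self,
        PySem.Dict.insert_insert_self, PySem.Dict.insert_insert_self]
    rw [insert_comm_of_contains _ s s' _ _ hs hss]
  · rw [PySem.Dict.getD_insert_of_ne _ _ _ hee,
        PySem.Dict.getD_insert_of_ne _ _ _ (Ne.symm hee)]
    exact insert_comm_of_contains _ e e' _ _ he hee

def pv (l : List ((String × String) × Int)) : PySem.Dict String (PySem.Dict String Int) :=
  l.foldl bPivot PySem.Dict.empty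

theorem pv_append (l : List ((String × String) × Int)) (p : (String × String) × Int) :
    pv (l ++ [p]) = nstep (pv l) p.1.1 p.1.2 p.2 := by
  simp [pv, List.foldl_append, bPivot_eq]

theorem nstep_nstep (D : PySem.Dict String (PySem.Dict String Int)) (e s : String) (c w : Int) :
    nstep (nstep D e s c) e s w = nstep D e s w := by
  unfold nstep
  rw [PySem.Dict.getD_insert_self, PySem.Dict.insert_insert_self,
      PySem.Dict.insert_insert_self]

theorem pv_mem (l : List ((String × String) × Int)) (k : String × String)
    (h : k ∈ l.map (·.1)) :
    (pv l).contains k.1 = true ∧ ((pv l).getD k.1 PySem.Dict.empty).contains k.2 = true := by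
  induction l using List.reverseRecOn with
  | nil => simp at h
  | append_singleton l p ih =>
    rw [pv_append]
    unfold nstep
    rw [List.map_append, List.mem_append] at h
    by_cases hk : k.1 = p.1.1
    · constructor
      · rw [PySem.Dict.contains_insert]; simp [hk]
      · rw [hk, PySem.Dict.getD_insert_self, PySem.Dict.contains_insert]
        rcases h with h | h
        · by_cases hk2 : k.2 = p.1.2
          · simp [hk2]
          · have := (ih h).2
            rw [hk] at this
            simp [this]
        · have : k = p.1 := by simpa using h
          simp [← this]
    · rcases h with h | h
      · obtain ⟨h1, h2⟩ := ih h
        refine ⟨?_, ?_⟩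
        · rw [PySem.Dict.contains_insert]; simp [h1]
        · rw [PySem.Dict.getD_insert_of_ne _ _ _ hk]; exact h2
      · exact absurd (by simpa using h : k = p.1) (fun hh => hk (by rw [hh]))

theorem pv_overwrite (l : List ((String × String) × Int)) (k : String × String) (w : Int)
    (hnd : (l.map (·.1)).Nodup) (hmem : k ∈ l.map (·.1)) :
    pv (l.map (fun p => if p.1 == k then (k, w) else p)) = nstep (pv l) k.1 k.2 w := by
  induction l using List.reverseRecOn with
  | nil => simp at hmem
  | append_singleton l p ih =>
    rw [List.map_append] at hnd hmem ⊢
    obtain ⟨hnd', -, hdisj⟩ := List.nodup_append.mp hnd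
    have hfresh : p.1 ∉ l.map (·.1) := fun hc => hdisj _ hc _ (by simp) rfl
    rw [List.mem_append] at hmem
    by_cases hk : k = p.1
    · have hmap : l.map (fun q => if q.1 == k then (k, w) else q) = l := by
        refine (List.map_congr_left ?_).trans (List.map_id _)
        intro q hq
        have : q.1 ≠ k := fun hh => hfresh (hk ▸ hh ▸ List.mem_map_of_mem hq)
        simp [this]
      simp only [List.map_singleton]
      rw [hmap, show ((if p.1 == k then (k, w) else p)) = (k, w) by simp [hk.symm],
          pv_append, pv_append]
      show nstep (pv l) k.1 k.2 w = nstep (nstep (pv l) p.1.1 p.1.2 p.2) k.1 k.2 w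
      rw [hk]
      exact (nstep_nstep _ _ _ _ _).symm
    · have hmem' : k ∈ l.map (·.1) := by
        rcases hmem with h | h
        · exact h
        · exact absurd (by simpa using h) hk
      have hpk : (p.1 == k) = false := by simpa using fun hh => hk hh.symm
      simp only [List.map_singleton, hpk, Bool.false_eq_true, if_false]
      rw [pv_append, pv_append, ih hnd' hmem']
      obtain ⟨he, hs⟩ := pv_mem l k hmem'
      exact nstep_comm (pv l) k.1 k.2 p.1.1 p.1.2 w p.2 he hs
        (by simp only [Prod.mk.eta]; exact fun hh => hk hh.symm)

theorem get?_mk_append (l : List ((String × String) × Int)) (k : String × String) (c : Int)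
    (q : String × String) (hk : k ∉ l.map (·.1)) :
    (PySem.Dict.mk (l ++ [(k, c)])).get? q = if q = k then some c else (PySem.Dict.mk l).get? q := by
  induction l with
  | nil =>
    rw [List.nil_append, PySem.Dict.get?_mk_cons]
    by_cases hq : q = k
    · simp [hq]
    · have : (k == q) = false := by simpa using fun hh => hq hh.symm
      simp [this, hq]
  | cons a l ih =>
    obtain ⟨a1, a2⟩ := a
    have hk1 : a1 ≠ k := fun hh => hk (by simp [hh])
    have hk2 : k ∉ l.map (·.1) := fun hh => hk (by simp [hh])
    rw [List.cons_append, PySem.Dict.get?_mk_cons, PySem.Dict.get?_mk_cons]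
    by_cases hq : q = k
    · subst hq
      have h2 : (a1 == q) = false := by simpa using hk1
      simp [h2, ih hk2]
    · by_cases ha : a1 = q <;> simp [ha, hq, ih hk2]

theorem getD_mk_append (l : List ((String × String) × Int)) (k : String × String) (c : Int)
    (q : String × String) (hk : k ∉ l.map (·.1)) :
    (PySem.Dict.mk (l ++ [(k, c)])).getD q 0 = if q = k then c else (PySem.Dict.mk l).getD q 0 := by
  rw [PySem.Dict.getD_eq_get?_getD, get?_mk_append l k c q hk]
  by_cases hq : q = k <;> simp [hq, ← PySem.Dict.getD_eq_get?_getD]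

theorem pv_getD (l : List ((String × String) × Int)) (e s : String)
    (hnd : (l.map (·.1)).Nodup) :
    ((pv l).getD e PySem.Dict.empty).getD s 0 = (PySem.Dict.mk l).getD (e, s) 0 := by
  induction l using List.reverseRecOn with
  | nil => simp [pv, PySem.Dict.getD_empty]; rfl
  | append_singleton l p ih =>
    rw [List.map_append] at hnd
    obtain ⟨hnd', -, hdisj⟩ := List.nodup_append.mp hnd
    have hfresh : p.1 ∉ l.map (·.1) := fun hc => hdisj _ hc _ (by simp) rfl
    obtain ⟨⟨pe, ps⟩, pc⟩ := p
    rw [pv_append]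
    unfold nstep
    rw [getD_mk_append l _ pc (e, s) hfresh]
    by_cases he : e = pe
    · subst he
      rw [PySem.Dict.getD_insert_self]
      by_cases hss : s = ps
      · subst hss
        rw [PySem.Dict.getD_insert_self]
        simp
      · rw [PySem.Dict.getD_insert_of_ne _ _ _ hss, ih hnd']
        simp [hss]
    · rw [PySem.Dict.getD_insert_of_ne _ _ _ he, ih hnd']
      simp [he]

theorem mk_items {κ ν : Type} [BEq κ] (d : PySem.Dict κ ν) : PySem.Dict.mk d.items = d := by
  cases d; rfl

theorem main_lemma (data : List (List (String × String))) :
    pv (data.foldl bTally PySem.Dict.empty).items = data.foldl aStep PySem.Dict.empty := by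
  induction data using List.reverseRecOn with
  | nil => rfl
  | append_singleton data row ih =>
    rw [List.foldl_append, List.foldl_append, List.foldl_cons, List.foldl_nil,
        List.foldl_cons, List.foldl_nil]
    set F := data.foldl bTally PySem.Dict.empty with hF
    have hnodup : F.keys.Nodup := by
      rw [hF]
      exact PySem.Dict.nodup_keys_foldl_insert_key data bKey
        (fun d x => d.getD (bKey x) 0 + 1) PySem.Dict.empty (by simp [PySem.Dict.keys, PySem.Dict.empty])
    have hnd : (F.items.map (·.1)).Nodup := by
      simpa [PySem.Dict.keys] using hnodup
    have hcnt : ((pv F.items).getD (bKey row).1 PySem.Dict.empty).getD (bKey row).2 0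
        = F.getD (bKey row) 0 := by
      rw [pv_getD _ _ _ hnd, mk_items, Prod.mk.eta]
    rw [aStep_eq, ← ih, hcnt]
    show pv (F.insert (bKey row) (F.getD (bKey row) 0 + 1)).items = _
    by_cases hc : F.contains (bKey row) = true
    · have hmem : bKey row ∈ F.items.map (·.1) := by
        have := (PySem.Dict.contains_iff_mem_keys F (bKey row)).mp hc
        simpa [PySem.Dict.keys] using this
      rw [PySem.Dict.items_insert_of_contains _ _ hc]
      exact pv_overwrite F.items (bKey row) _ hnd hmem
    · have hcf : F.contains (bKey row) = false := by simpa using hc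
      rw [PySem.Dict.items_insert_of_not_contains _ _ hcf, pv_append]

-- ===== VERDICT (by name: the statement is the Claim_ definition above) =====
theorem count_sentiments_by_entity_spec : Claim_equal_count_sentiments_by_entity := by
  intro data _ _
  unfold Spec_count_sentiments_by_entity count_sentiments_by_entity count_sentiments_by_entity_alt
  rw [show (data.foldl bTally PySem.Dict.empty).items.foldl bPivot PySem.Dict.empty = pv (data.foldl bTally PySem.Dict.empty).items from rfl, main_lemma]
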